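-- pv_equiv track=rewrite | github.com/VieriMansyl/Algeo02-20092 | svd.py | createSigmaMat
-- ===== SOURCE A (Python) =====
-- def createSigmaMat(sigma, nrow, ncol):
-- 	sigmaMat = []
--
-- 	for i in range(nrow):
-- 		eachRow = []
-- 		for j in range(ncol):
-- 			if(i == j):
-- 				eachRow.append(sigma[i])
-- 			else:
-- 				eachRow.append(0)
-- 		sigmaMat.append(eachRow)
--
-- 	return sigmaMat
-- ===== SOURCE B (Python) =====
-- def createSigmaMat(sigma, nrow, ncol):
--     d = max(0, min(nrow, ncol))
--     out = [[0] * i + [sigma[i]] + [0] * (ncol - i - 1) for i in range(d)]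
--     out.extend([0] * ncol for _ in range(nrow - d))
--     return out
-- ===== Notes on version B (the rewrite author's own statement) =====
-- stated objective: alternative
-- what changed: B assembles each of the first max(0,min(nrow,ncol)) rows by concatenating three blocks ([0]*i + [sigma[i]] + trailing zeros) and then appends the remaining all-zero rows, instead of A's nested per-cell loop with an i==j branch.
import Mathlib
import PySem

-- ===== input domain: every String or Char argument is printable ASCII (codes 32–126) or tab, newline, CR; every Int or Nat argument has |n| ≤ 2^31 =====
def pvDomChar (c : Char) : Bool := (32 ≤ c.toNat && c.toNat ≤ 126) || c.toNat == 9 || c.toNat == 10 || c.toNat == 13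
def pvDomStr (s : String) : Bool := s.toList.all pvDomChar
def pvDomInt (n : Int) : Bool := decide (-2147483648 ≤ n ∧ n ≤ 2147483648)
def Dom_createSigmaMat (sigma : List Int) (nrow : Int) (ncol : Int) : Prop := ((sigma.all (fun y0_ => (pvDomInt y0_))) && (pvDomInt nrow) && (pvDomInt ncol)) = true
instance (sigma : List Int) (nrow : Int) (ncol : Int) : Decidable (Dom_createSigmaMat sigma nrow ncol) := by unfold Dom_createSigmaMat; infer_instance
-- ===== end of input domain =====

-- B assembles each diagonal row by block concatenation ([0]*i + [sigma[i]] + trailing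
-- zeros) and appends the remaining all-zero rows, instead of A's per-cell i==j branch;
-- objective: alternative.

-- ===== PORT A =====
def createSigmaMat (sigma : List Int) (nrow : Int) (ncol : Int) : List (List Int) :=
  (PySem.List.pyRange 0 nrow 1).foldl (fun sigmaMat i =>
    sigmaMat ++ [(PySem.List.pyRange 0 ncol 1).foldl (fun eachRow j =>
      if i = j then eachRow ++ [(PySem.List.pyGet? sigma i).getD 0]  -- sigma[i]; in range under Pre_
      else eachRow ++ [0]) []]) []

-- ===== PORT B =====
def createSigmaMat_alt (sigma : List Int) (nrow : Int) (ncol : Int) : List (List Int) :=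
  -- d = max(0, min(nrow, ncol)); out = [[0]*i + [sigma[i]] + [0]*(ncol-i-1) for i in range(d)]
  ((PySem.List.pyRange 0 (max 0 (min nrow ncol)) 1).map (fun i =>
    List.replicate i.toNat 0 ++ [(PySem.List.pyGet? sigma i).getD 0]
      ++ List.replicate (ncol - i - 1).toNat 0))
  -- out.extend([0]*ncol for _ in range(nrow - d))
  ++ (PySem.List.pyRange 0 (nrow - max 0 (min nrow ncol)) 1).map (fun _ => List.replicate ncol.toNat 0)

-- ===== PRECONDITION & SPEC =====
-- Pre_ excludes exactly the inputs where Python A raises IndexError (sigma[i] with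
-- i < min(nrow, ncol) but i >= len(sigma)); B raises there too.
def Pre_createSigmaMat (sigma : List Int) (nrow : Int) (ncol : Int) : Prop :=
  min nrow ncol ≤ (sigma.length : Int)
instance (sigma : List Int) (nrow : Int) (ncol : Int) : Decidable (Pre_createSigmaMat sigma nrow ncol) := by unfold Pre_createSigmaMat; infer_instance

def pvWitness_createSigmaMat : List Int × Int × Int := ([3, 2], 3, 2)

def Spec_createSigmaMat (sigma : List Int) (nrow : Int) (ncol : Int) (out : List (List Int)) : Prop := out = createSigmaMat_alt sigma nrow ncol
instance (sigma : List Int) (nrow : Int) (ncol : Int) (out : List (List Int)) : Decidable (Spec_createSigmaMat sigma nrow ncol out) := by unfold Spec_createSigmaMat; infer_instance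

-- ===== CLAIM (what is proved, stated in full; the proofs are below) =====
def Claim_equal_createSigmaMat : Prop := ∀ (sigma : List Int) (nrow : Int) (ncol : Int), Dom_createSigmaMat sigma nrow ncol → Pre_createSigmaMat sigma nrow ncol → Spec_createSigmaMat sigma nrow ncol (createSigmaMat sigma nrow ncol)

-- ===== LEMMAS AND PROOFS =====

-- the diagonal entry value and the i-th row of the intended matrix, as nat-indexed specs
def pvDiag (sigma : List Int) (i : Nat) : Int := (PySem.List.pyGet? sigma (i : Int)).getD 0
def pvRow (sigma : List Int) (c i : Nat) : List Int :=
  (List.range c).map (fun j => if i = j then pvDiag sigma i else 0)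

lemma pvRow_of_ge (sigma : List Int) (c i : Nat) (h : c ≤ i) :
    pvRow sigma c i = List.replicate c 0 := by
  apply List.ext_getElem <;> simp [pvRow]
  intro j hj _
  omega

lemma block_eq_pvRow (sigma : List Int) (c i : Nat) (h : i < c) :
    List.replicate i (0 : Int) ++ [pvDiag sigma i] ++ List.replicate (c - i - 1) 0
      = pvRow sigma c i := by
  apply List.ext_getElem
  · simp [pvRow]; omega
  · intro j hj hj'
    simp only [pvRow, List.getElem_map, List.getElem_range]
    rcases lt_trichotomy j i with hlt | rfl | hgt
    · rw [List.getElem_append_left (by simp; omega)]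
      rw [List.getElem_append_left (by simpa using hlt)]
      simp [Nat.ne_of_gt hlt]
    · rw [List.getElem_append_left (by simp), List.getElem_append_right (by simp)]
      simp
    · rw [List.getElem_append_right (by simp; omega)]
      simp only [List.length_append, List.length_replicate, List.length_cons, List.length_nil]
      simp [List.getElem_replicate, Nat.ne_of_lt hgt]

lemma portA_eq (sigma : List Int) (nrow ncol : Int) :
    createSigmaMat sigma nrow ncol
      = (List.range nrow.toNat).map (pvRow sigma ncol.toNat) := by
  unfold createSigmaMat
  rw [PySem.List.pyRange_zero nrow, List.foldl_map,
      PySem.List.foldl_append_singleton_eq_map]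
  simp only [List.nil_append]
  apply List.map_congr_left
  intro i _
  rw [PySem.List.pyRange_zero ncol, List.foldl_map]
  have : ∀ (acc : List Int) (j : Nat),
      (if (i : Int) = (j : Int) then acc ++ [(PySem.List.pyGet? sigma (i:Int)).getD 0] else acc ++ [0])
        = acc ++ [if i = j then pvDiag sigma i else 0] := by
    intro acc j
    by_cases h : i = j <;> simp [h, pvDiag]
  simp only [this]
  rw [PySem.List.foldl_append_singleton_eq_map]
  simp [pvRow]

lemma portB_eq (sigma : List Int) (nrow ncol : Int) :
    createSigmaMat_alt sigma nrow ncol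
      = (List.range (max 0 (min nrow ncol)).toNat).map (fun i => pvRow sigma ncol.toNat i)
        ++ (List.range (nrow - max 0 (min nrow ncol)).toNat).map
            (fun _ => List.replicate ncol.toNat 0) := by
  unfold createSigmaMat_alt
  rw [PySem.List.pyRange_zero, PySem.List.pyRange_zero, List.map_map, List.map_map]
  congr 1
  apply List.map_congr_left
  intro i hi
  simp only [List.mem_range] at hi
  simp only [Function.comp]
  have h1 : (Int.toNat (i : Int)) = i := by omega
  have h2 : (ncol - (i : Int) - 1).toNat = ncol.toNat - i - 1 := by omega
  have h3 : i < ncol.toNat := by omega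
  rw [h1, h2, ← block_eq_pvRow sigma ncol.toNat i h3]
  rfl

-- ===== VERDICT (by name: the statement is the Claim_ definition above) =====
theorem createSigmaMat_spec : Claim_equal_createSigmaMat := by
  intro sigma nrow ncol _ _
  unfold Spec_createSigmaMat
  rw [portA_eq, portB_eq]
  apply List.ext_getElem
  · simp; omega
  · intro j hj hj'
    simp only [List.length_map, List.length_range] at hj
    simp only [List.getElem_map, List.getElem_range]
    by_cases h : j < (max 0 (min nrow ncol)).toNat
    · rw [List.getElem_append_left (by simp; omega)]
      simp
    · rw [List.getElem_append_right (by simp; omega)]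
      simp only [List.length_map, List.length_range, List.getElem_map]
      rw [pvRow_of_ge]
      omega
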